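-- pv_equiv track=rewrite | github.com/pypi-data/pypi-mirror-401 | packages/spark-bestfit/spark_bestfit-2.7.0.tar.gz/spark_bestfit-2.7.0/tests/test_partition_strategy.py | _interleave_distributions
-- ===== SOURCE A (Python) =====
-- from typing import List, Set
--
-- SLOW_DISTRIBUTIONS: Set[str] = {
--     "powerlognorm",
--     "norminvgauss",
--     "t",
--     "pearson3",
--     "exponweib",
--     "johnsonsb",
--     "jf_skew_t",
--     "fisk",
--     "gengamma",
--     "johnsonsu",
--     "burr",
--     "burr12",
--     "truncweibull_min",
--     "invweibull",
--     "rice",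
--     "genexpon",
-- }
--
-- def _interleave_distributions(distributions: List[str]) -> List[str]:
--     """Interleave slow distributions among fast ones."""
--     slow = [d for d in distributions if d in SLOW_DISTRIBUTIONS]
--     fast = [d for d in distributions if d not in SLOW_DISTRIBUTIONS]
--
--     if not slow or not fast:
--         return distributions
--
--     result = []
--     slow_interval = max(1, len(fast) // len(slow))
--     slow_idx = 0
--     for i, d in enumerate(fast):
--         if slow_idx < len(slow) and i % slow_interval == 0:
--             result.append(slow[slow_idx])
--             slow_idx += 1
--         result.append(d)
--     result.extend(slow[slow_idx:])
--     return result
-- ===== SOURCE B (Python) =====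
-- from typing import List, Set
--
-- SLOW_DISTRIBUTIONS: Set[str] = {
--     "powerlognorm",
--     "norminvgauss",
--     "t",
--     "pearson3",
--     "exponweib",
--     "johnsonsb",
--     "jf_skew_t",
--     "fisk",
--     "gengamma",
--     "johnsonsu",
--     "burr",
--     "burr12",
--     "truncweibull_min",
--     "invweibull",
--     "rice",
--     "genexpon",
-- }
--
-- def _interleave_distributions(distributions: List[str]) -> List[str]:
--     """Interleave slow distributions among fast ones (recursive chunked merge)."""
--     slow = [d for d in distributions if d in SLOW_DISTRIBUTIONS]
--     fast = [d for d in distributions if d not in SLOW_DISTRIBUTIONS]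
--
--     if not slow or not fast:
--         return distributions
--
--     interval = max(1, len(fast) // len(slow))
--
--     def merge(slow: List[str], fast: List[str]) -> List[str]:
--         if not fast:
--             return slow
--         if not slow:
--             return fast
--         return [slow[0]] + fast[:interval] + merge(slow[1:], fast[interval:])
--
--     return merge(slow, fast)
-- ===== Notes on version B (the rewrite author's own statement) =====
-- stated objective: alternative
-- what changed: A's single flat loop over enumerate(fast) with an i % slow_interval == 0 test and a running slow_idx is replaced by a recursive merge that consumes one slow element and one interval-sized chunk of fast per step, with the leftover slow (or fast) tail returned when the other list runs out.
import Mathlib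
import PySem

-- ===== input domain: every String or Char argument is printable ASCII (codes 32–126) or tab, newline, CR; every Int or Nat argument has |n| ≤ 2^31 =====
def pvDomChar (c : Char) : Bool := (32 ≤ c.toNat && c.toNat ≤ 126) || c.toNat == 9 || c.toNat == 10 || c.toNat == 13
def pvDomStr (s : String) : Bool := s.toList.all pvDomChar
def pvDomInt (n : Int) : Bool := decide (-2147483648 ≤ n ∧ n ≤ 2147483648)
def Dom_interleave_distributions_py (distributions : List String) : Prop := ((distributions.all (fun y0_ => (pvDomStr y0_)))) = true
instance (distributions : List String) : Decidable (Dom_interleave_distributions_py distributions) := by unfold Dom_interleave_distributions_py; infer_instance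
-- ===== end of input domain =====

-- B replaces A's flat enumerate-with-modulo loop by a recursive chunked merge of the
-- slow list with interval-sized blocks of the fast list (objective: alternative decomposition).

-- ===== PORT A =====
def pvSlowDistributions : List String :=
  ["powerlognorm", "norminvgauss", "t", "pearson3", "exponweib", "johnsonsb",
   "jf_skew_t", "fisk", "gengamma", "johnsonsu", "burr", "burr12",
   "truncweibull_min", "invweibull", "rice", "genexpon"]

-- loop body of A's `for i, d in enumerate(fast)` (state = (result, slow_idx))
def pvStepA (slow : List String) (m : Nat) (st : List String × Nat) (p : String × Nat) :
    List String × Nat :=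
  if st.2 < slow.length && p.2 % m == 0 then
    (st.1 ++ [slow.getD st.2 ""] ++ [p.1], st.2 + 1)
  else
    (st.1 ++ [p.1], st.2)

def interleave_distributions_py (distributions : List String) : List String :=
  let slow := distributions.filter (fun d => pvSlowDistributions.contains d)
  let fast := distributions.filter (fun d => !(pvSlowDistributions.contains d))
  if slow.isEmpty || fast.isEmpty then distributions
  else
    let m := max 1 (fast.length / slow.length)
    let st := (fast.zipIdx 0).foldl (pvStepA slow m) ([], 0)
    st.1 ++ slow.drop st.2

-- ===== PORT B =====
-- B's recursive `merge` helper: one slow element, then an interval-sized chunk of fast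
def pvMerge (m : Nat) (slow fast : List String) : List String :=
  if fast.isEmpty then slow
  else
    match slow with
    | [] => fast
    | s :: rest => s :: (fast.take m ++ pvMerge m rest (fast.drop m))

def interleave_distributions_py_alt (distributions : List String) : List String :=
  let slow := distributions.filter (fun d => pvSlowDistributions.contains d)
  let fast := distributions.filter (fun d => !(pvSlowDistributions.contains d))
  if slow.isEmpty || fast.isEmpty then distributions
  else pvMerge (max 1 (fast.length / slow.length)) slow fast

-- ===== PRECONDITION & SPEC =====
def Spec_interleave_distributions_py (distributions : List String) (out : List String) : Prop := out = interleave_distributions_py_alt distributions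
instance (distributions : List String) (out : List String) : Decidable (Spec_interleave_distributions_py distributions out) := by unfold Spec_interleave_distributions_py; infer_instance

-- ===== CLAIM (what is proved, stated in full; the proofs are below) =====
def Claim_equal_interleave_distributions_py : Prop := ∀ (distributions : List String), Dom_interleave_distributions_py distributions → Spec_interleave_distributions_py distributions (interleave_distributions_py distributions)

-- ===== LEMMAS AND PROOFS =====

-- the accumulated result is only appended to: pull the accumulator out of the fold
theorem pvFoldA_acc (slow : List String) (m : Nat) (l : List (String × Nat))
    (res : List String) (j : Nat) :
    l.foldl (pvStepA slow m) (res, j)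
      = (res ++ (l.foldl (pvStepA slow m) ([], j)).1, (l.foldl (pvStepA slow m) ([], j)).2) := by
  induction l generalizing res j with
  | nil => simp
  | cons p t ih =>
      simp only [List.foldl_cons]
      by_cases h : (decide (j < slow.length) && p.2 % m == 0) = true
      · have e : ∀ r : List String, pvStepA slow m (r, j) p = (r ++ [slow.getD j ""] ++ [p.1], j + 1) := by
          intro r; unfold pvStepA; rw [if_pos h]
        rw [e res, e [], ih _ (j + 1), ih ([] ++ [slow.getD j ""] ++ [p.1]) (j + 1)]
        simp
      · have e : ∀ r : List String, pvStepA slow m (r, j) p = (r ++ [p.1], j) := by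
          intro r; unfold pvStepA; rw [if_neg h]
        rw [e res, e [], ih _ j, ih ([] ++ [p.1]) j]
        simp

-- once slow is exhausted, the loop just copies the remaining fast elements
theorem pvFoldA_exhaust (slow : List String) (m : Nat) (l : List (String × Nat))
    (res : List String) (j : Nat) (hj : slow.length ≤ j) :
    l.foldl (pvStepA slow m) (res, j) = (res ++ l.map (·.1), j) := by
  induction l generalizing res with
  | nil => simp
  | cons p t ih =>
      simp only [List.foldl_cons]
      have e : pvStepA slow m (res, j) p = (res ++ [p.1], j) := by
        unfold pvStepA
        rw [if_neg]
        simp only [Bool.and_eq_true, decide_eq_true_eq, not_and]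
        omega
      rw [e, ih]
      simp

-- on a stretch of indices none of which is ≡ 0 (mod m), the loop just copies
theorem pvFoldA_pass (slow : List String) (m : Nat) (l : List String) (i0 : Nat)
    (res : List String) (j : Nat)
    (h : ∀ k, k < l.length → (i0 + k) % m ≠ 0) :
    (l.zipIdx i0).foldl (pvStepA slow m) (res, j) = (res ++ l, j) := by
  induction l generalizing i0 res with
  | nil => simp
  | cons d t ih =>
      simp only [List.zipIdx_cons, List.foldl_cons]
      have h0 : i0 % m ≠ 0 := by simpa using h 0 (by simp)
      have e : pvStepA slow m (res, j) (d, i0) = (res ++ [d], j) := by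
        unfold pvStepA
        rw [if_neg]
        simp only [Bool.and_eq_true, beq_iff_eq, not_and]
        exact fun _ => h0
      rw [e, ih (i0 + 1) (res ++ [d]) (fun k hk => by
        have hx : i0 + 1 + k = i0 + (k + 1) := by omega
        rw [hx]
        exact h (k + 1) (by simpa using Nat.succ_lt_succ hk))]
      simp

-- unfolding equations for pvMerge (one per shape)
theorem pvMerge_fast_nil (m : Nat) (s : List String) : pvMerge m s [] = s := by
  unfold pvMerge; simp

theorem pvMerge_slow_nil (m : Nat) (f : List String) : pvMerge m [] f = f := by
  unfold pvMerge; cases f <;> simp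

theorem pvMerge_cons (m : Nat) (s : String) (rest : List String) (d : String) (t : List String) :
    pvMerge m (s :: rest) (d :: t)
      = s :: ((d :: t).take m ++ pvMerge m rest ((d :: t).drop m)) := by
  conv_lhs => rw [pvMerge]
  simp

-- main invariant: the A-loop started at a chunk boundary computes B's merge
theorem pvMain (S : List String) (m : Nat) (hm : 1 ≤ m) :
    ∀ (n : Nat) (fast : List String), fast.length ≤ n → ∀ (j i0 : Nat), i0 % m = 0 →
      (((fast.zipIdx i0).foldl (pvStepA S m) ([], j)).1
        ++ S.drop (((fast.zipIdx i0).foldl (pvStepA S m) ([], j)).2))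
        = pvMerge m (S.drop j) fast := by
  intro n
  induction n with
  | zero =>
      intro fast hf j i0 _
      have : fast = [] := List.length_eq_zero_iff.mp (Nat.le_zero.mp hf)
      subst this
      simp [pvMerge_fast_nil]
  | succ n ih =>
      intro fast hf j i0 hi0
      cases hfe : fast with
      | nil => simp [pvMerge_fast_nil]
      | cons d t =>
          subst hfe
          by_cases hj : S.length ≤ j
          · -- slow exhausted: loop copies fast, merge returns fast
            rw [pvFoldA_exhaust S m _ [] j hj]
            have hdrop : S.drop j = [] := List.drop_eq_nil_of_le hj
            simp [hdrop, pvMerge_slow_nil, List.zipIdx_map_fst]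
          · rw [not_le] at hj
            obtain ⟨m', hm'⟩ : ∃ m', m = m' + 1 := ⟨m - 1, by omega⟩
            have hsplit : d :: t = (d :: t).take m ++ (d :: t).drop m := by simp
            have htake : (d :: t).take m = d :: t.take m' := by simp [hm']
            have hpassTail : ∀ (res : List String) (j' : Nat),
                ((t.take m').zipIdx (i0 + 1)).foldl (pvStepA S m) (res, j')
                  = (res ++ t.take m', j') := by
              intro res j'
              refine pvFoldA_pass S m (t.take m') (i0 + 1) res j' (fun k hk => ?_)
              have hkm : k < m' := lt_of_lt_of_le hk (by simpa using List.length_take_le m' t)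
              obtain ⟨q, hq⟩ := Nat.dvd_of_mod_eq_zero hi0
              have h1 : (i0 + 1 + k) % m = (1 + k) % m := by
                have hx : i0 + 1 + k = m * q + (1 + k) := by omega
                rw [hx, Nat.mul_add_mod]
              have h2 : (1 + k) % m = 1 + k := Nat.mod_eq_of_lt (by omega)
              rw [h1, h2]
              omega
            have hfire : (pvStepA S m ([], j) (d, i0)) = ([S.getD j ""] ++ [d], j + 1) := by
              unfold pvStepA
              simp [hj, hi0]
            have hdropS : S.drop j = S[j] :: S.drop (j + 1) := List.drop_eq_getElem_cons hj
            have hmergeRHS : pvMerge m (S.drop j) (d :: t)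
                = S[j] :: ((d :: t.take m') ++ pvMerge m (S.drop (j + 1)) ((d :: t).drop m)) := by
              rw [hdropS, pvMerge_cons, htake]
            by_cases hrest : (d :: t).drop m = []
            · -- fast fits in one chunk
              have hchunk : d :: t = d :: t.take m' := by
                conv_lhs => rw [hsplit, hrest]
                simp [htake]
              conv_lhs => rw [hchunk]
              simp only [List.zipIdx_cons, List.foldl_cons, hfire]
              rw [hpassTail]
              rw [hmergeRHS, hrest, pvMerge_fast_nil]
              simp [List.getD, List.getElem?_eq_getElem hj]
            · -- at least one full chunk, recurse on the rest
              have hmlen : m ≤ t.length + 1 := by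
                by_contra hc
                exact hrest (List.drop_eq_nil_of_le (by simp; omega))
              have hchunklen : (d :: t.take m').length = m := by
                simp only [List.length_cons, List.length_take]
                omega
              conv_lhs => rw [hsplit, htake]
              rw [List.zipIdx_append, List.foldl_append]
              simp only [List.zipIdx_cons, List.foldl_cons, hfire]
              rw [hpassTail]
              rw [pvFoldA_acc]
              have hlen : ((d :: t).drop m).length ≤ n := by
                simp only [List.length_drop, List.length_cons]
                have h2 : (d :: t).length ≤ n + 1 := hf
                simp only [List.length_cons] at h2
                omega
              have hi0' : (i0 + (d :: t.take m').length) % m = 0 := by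
                rw [hchunklen, Nat.add_mod, hi0, Nat.mod_self]
                simp
              have hrec := ih ((d :: t).drop m) hlen (j + 1) (i0 + (d :: t.take m').length) hi0'
              rw [hmergeRHS, ← hrec]
              simp [List.getD, List.getElem?_eq_getElem hj]

-- ===== VERDICT =====
theorem interleave_distributions_py_spec : Claim_equal_interleave_distributions_py := by
  intro distributions _
  unfold Spec_interleave_distributions_py interleave_distributions_py interleave_distributions_py_alt
  set slow := distributions.filter (fun d => pvSlowDistributions.contains d) with hslow
  set fast := distributions.filter (fun d => !(pvSlowDistributions.contains d)) with hfast
  by_cases he : (slow.isEmpty || fast.isEmpty) = true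
  · simp [he]
  · simp only [he, Bool.false_eq_true, if_false]
    have hm : 1 ≤ max 1 (fast.length / slow.length) := le_max_left _ _
    have := pvMain slow (max 1 (fast.length / slow.length)) hm fast.length fast le_rfl 0 0
      (Nat.zero_mod _)
    simpa using this
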